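-- pv_equiv track=rewrite | github.com/werserk/kira-project | src/kira/core/yaml_serializer.py | get_canonical_key_order
-- ===== SOURCE A (Python) =====
-- CANONICAL_KEY_ORDER = [
--     # Core identity
--     "id",
--     "title",
--     # Entity metadata
--     "type",
--     "status",
--     "state",
--     "priority",
--     # Timestamps (always UTC ISO-8601)
--     "created",
--     "updated",
--     "due_date",
--     "start_time",
--     "end_time",
--     "done_ts",
--     "start_ts",
--     # Classification
--     "tags",
--     "category",
--     # Relationships
--     "relates_to",
--     "depends_on",
--     "blocks",
--     "parent",
--     "links",
--     # Optional fields
--     "description",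
--     "assignee",
--     "estimate",
--     "location",
--     "attendees",
--     "calendar",
--     "source",
--     "reopen_reason",
--     # Kira sync metadata
--     "x-kira",
-- ]
--
-- def get_canonical_key_order(keys: list[str]) -> list[str]:
--     """Get keys in canonical order.
--
--     Parameters
--     ----------
--     keys
--         Keys to order
--
--     Returns
--     -------
--     list[str]
--         Keys in canonical order
--     """
--     # Separate known and unknown keys
--     known_keys = []
--     unknown_keys = []
--
--     for key in keys:
--         if key in CANONICAL_KEY_ORDER:
--             known_keys.append(key)
--         else:
--             unknown_keys.append(key)
--
--     # Sort known keys by canonical order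
--     known_keys.sort(key=lambda k: CANONICAL_KEY_ORDER.index(k))
--
--     # Sort unknown keys alphabetically
--     unknown_keys.sort()
--
--     return known_keys + unknown_keys
-- ===== SOURCE B (Python) =====
-- CANONICAL_KEY_ORDER = [
--     "id", "title",
--     "type", "status", "state", "priority",
--     "created", "updated", "due_date", "start_time", "end_time", "done_ts", "start_ts",
--     "tags", "category",
--     "relates_to", "depends_on", "blocks", "parent", "links",
--     "description", "assignee", "estimate", "location", "attendees", "calendar",
--     "source", "reopen_reason",
--     "x-kira",
-- ]
--
-- _CANONICAL_SET = set(CANONICAL_KEY_ORDER)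
--
--
-- def get_canonical_key_order(keys: list[str]) -> list[str]:
--     """Get keys in canonical order (counter pass over the canonical table)."""
--     counts = {}
--     unknown = []
--     for key in keys:
--         if key in _CANONICAL_SET:
--             counts[key] = counts.get(key, 0) + 1
--         else:
--             unknown.append(key)
--     ordered = []
--     for canon in CANONICAL_KEY_ORDER:
--         ordered.extend([canon] * counts.get(canon, 0))
--     ordered.extend(sorted(unknown))
--     return ordered
-- ===== Notes on version B (the rewrite author's own statement) =====
-- stated objective: faster
-- what changed: Instead of sorting the known keys by CANONICAL_KEY_ORDER.index (a sort whose key computes an O(29) list.index scan per element), B counts known keys in one dict pass and emits each canonical key repeated by its count in a single sweep over the fixed canonical table; unknown keys are still collected and sorted alphabetically.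
import Mathlib
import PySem

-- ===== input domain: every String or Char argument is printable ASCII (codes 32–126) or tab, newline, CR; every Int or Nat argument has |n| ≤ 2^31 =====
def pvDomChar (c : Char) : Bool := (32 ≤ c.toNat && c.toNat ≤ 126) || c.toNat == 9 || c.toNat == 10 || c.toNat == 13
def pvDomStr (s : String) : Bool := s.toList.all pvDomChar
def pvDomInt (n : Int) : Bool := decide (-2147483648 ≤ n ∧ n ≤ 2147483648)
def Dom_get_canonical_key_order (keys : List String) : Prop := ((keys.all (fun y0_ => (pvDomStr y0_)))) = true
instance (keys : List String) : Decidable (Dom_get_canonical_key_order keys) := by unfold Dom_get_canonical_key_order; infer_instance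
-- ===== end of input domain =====

-- B replaces A's sort-of-known-keys-by-canonical-index with a counter pass plus one sweep
-- over the fixed canonical table (objective: faster, measured; unknown keys still sorted).


-- ===== PORT A =====
def CANONICAL_KEY_ORDER : List String :=
  ["id", "title", "type", "status", "state", "priority",
   "created", "updated", "due_date", "start_time", "end_time", "done_ts", "start_ts",
   "tags", "category", "relates_to", "depends_on", "blocks", "parent", "links",
   "description", "assignee", "estimate", "location", "attendees", "calendar",
   "source", "reopen_reason", "x-kira"]

-- key of `known_keys.sort(key=lambda k: CANONICAL_KEY_ORDER.index(k))`; the sort is only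
-- applied to keys that are in CANONICAL_KEY_ORDER, so `.index` never raises and the
-- `.getD 0` default is never used: the port is exact.
def pvIdxKey (k : String) : Nat := (PySem.List.index? CANONICAL_KEY_ORDER k).getD 0

def get_canonical_key_order (keys : List String) : List String :=
  let p := keys.foldl
    (fun acc key =>
      if CANONICAL_KEY_ORDER.contains key then (acc.1 ++ [key], acc.2)
      else (acc.1, acc.2 ++ [key]))
    (([] : List String), ([] : List String))
  PySem.List.sorted p.1 pvIdxKey false ++ PySem.List.sorted p.2 (fun x => x) false

-- ===== PORT B =====
def pvCanonicalSet : PySem.Set String := PySem.Set.ofList CANONICAL_KEY_ORDER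

def get_canonical_key_order_alt (keys : List String) : List String :=
  let p := keys.foldl
    (fun acc key =>
      if PySem.Set.contains pvCanonicalSet key then
        (acc.1.insert key (acc.1.getD key 0 + 1), acc.2)
      else (acc.1, acc.2 ++ [key]))
    ((PySem.Dict.empty : PySem.Dict String Int), ([] : List String))
  let ordered := CANONICAL_KEY_ORDER.foldl
    (fun acc canon => acc ++ List.replicate (p.1.getD canon 0).toNat canon) []
  ordered ++ PySem.List.sorted p.2 (fun x => x) false

-- ===== PRECONDITION & SPEC =====
def Spec_get_canonical_key_order (keys : List String) (out : List String) : Prop := out = get_canonical_key_order_alt keys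
instance (keys : List String) (out : List String) : Decidable (Spec_get_canonical_key_order keys out) := by unfold Spec_get_canonical_key_order; infer_instance

-- ===== CLAIM (what is proved, stated in full; the proofs are below) =====
def Claim_equal_get_canonical_key_order : Prop := ∀ (keys : List String), Dom_get_canonical_key_order keys → Spec_get_canonical_key_order keys (get_canonical_key_order keys)

-- ===== LEMMAS AND PROOFS =====

-- A's partition loop, both components at once.
theorem pvFoldA (keys a b : List String) :
    keys.foldl
      (fun acc key =>
        if CANONICAL_KEY_ORDER.contains key then (acc.1 ++ [key], acc.2)
        else (acc.1, acc.2 ++ [key])) (a, b)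
    = (a ++ keys.filter (fun k => CANONICAL_KEY_ORDER.contains k),
       b ++ keys.filter (fun k => !CANONICAL_KEY_ORDER.contains k)) := by
  induction keys generalizing a b with
  | nil => simp
  | cons k t ih =>
    rw [List.foldl_cons]
    by_cases h : k ∈ CANONICAL_KEY_ORDER
    · rw [if_pos (by simpa using h), ih]
      simp [h]
    · rw [if_neg (by simpa using h), ih]
      simp [h]

-- B's counting loop, both components at once.
theorem pvFoldB (keys : List String) (d : PySem.Dict String Int) (b : List String) :
    keys.foldl
      (fun acc key =>
        if PySem.Set.contains pvCanonicalSet key then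
          (acc.1.insert key (acc.1.getD key 0 + 1), acc.2)
        else (acc.1, acc.2 ++ [key])) (d, b)
    = ((keys.filter (fun k => CANONICAL_KEY_ORDER.contains k)).foldl
         (fun d k => d.insert k (d.getD k 0 + 1)) d,
       b ++ keys.filter (fun k => !CANONICAL_KEY_ORDER.contains k)) := by
  induction keys generalizing d b with
  | nil => simp
  | cons k t ih =>
    have hc : PySem.Set.contains pvCanonicalSet k = CANONICAL_KEY_ORDER.contains k := by
      simp [pvCanonicalSet, PySem.Set.mem_ofList]
    rw [List.foldl_cons]
    by_cases h : k ∈ CANONICAL_KEY_ORDER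
    · rw [if_pos (by rw [hc]; simpa using h), ih]
      simp [h]
    · rw [if_neg (by rw [hc]; simpa using h), ih]
      simp [h]

-- pvIdxKey is injective on members of CANONICAL_KEY_ORDER.
theorem pvIdxKey_inj {a b : String} (ha : a ∈ CANONICAL_KEY_ORDER)
    (hb : b ∈ CANONICAL_KEY_ORDER) (h : pvIdxKey a = pvIdxKey b) : a = b := by
  rcases Option.isSome_iff_exists.mp ((PySem.List.index?_isSome_iff CANONICAL_KEY_ORDER a).mpr ha) with ⟨i, hi⟩
  rcases Option.isSome_iff_exists.mp ((PySem.List.index?_isSome_iff CANONICAL_KEY_ORDER b).mpr hb) with ⟨j, hj⟩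
  rcases PySem.List.getElem_of_index?_eq_some hi with ⟨hik, hia, -⟩
  rcases PySem.List.getElem_of_index?_eq_some hj with ⟨hjk, hjb, -⟩
  simp only [pvIdxKey, hi, hj, Option.getD_some] at h
  subst h
  exact hia.symm.trans hjb

-- pvIdxKey is strictly increasing along CANONICAL_KEY_ORDER itself.
theorem pvCanon_pairwise : CANONICAL_KEY_ORDER.Pairwise (fun a b => pvIdxKey a < pvIdxKey b) := by
  decide

theorem pvCanon_nodup : CANONICAL_KEY_ORDER.Nodup := by decide

-- The grouped list B builds is a permutation of the known keys.
theorem pvFlat_perm (cs : List String) (hnd : cs.Nodup) (l : List String)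
    (hl : ∀ x ∈ l, x ∈ cs) :
    (cs.flatMap (fun c => List.replicate (l.count c) c)).Perm l := by
  induction cs generalizing l with
  | nil =>
    have : l = [] := List.eq_nil_iff_forall_not_mem.mpr (fun x hx => by simpa using hl x hx)
    simp [this]
  | cons c cs ih =>
    have hnd' := List.nodup_cons.mp hnd
    have h1 : (List.replicate (l.count c) c).Perm (l.filter (· == c)) := by
      rw [List.filter_beq]
    have h2 : cs.flatMap (fun c' => List.replicate ((l.filter (fun x => !(x == c))).count c') c')
        = cs.flatMap (fun c' => List.replicate (l.count c') c') := by
      refine List.flatMap_congr (fun c' hc' => ?_)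
      have hne : c' ≠ c := fun hne => hnd'.1 (hne ▸ hc')
      rw [List.count_filter]
      simp [hne]
    refine List.Perm.trans ?_ (List.filter_append_perm (· == c) l)
    simp only [List.flatMap_cons]
    refine List.Perm.append h1 ?_
    rw [← h2]
    refine ih hnd'.2 _ (fun x hx => ?_)
    have hx1 : x ∈ l := List.mem_of_mem_filter hx
    have hx2 : ¬(x == c) = true := by simpa using List.of_mem_filter hx
    rcases List.mem_cons.mp (hl x hx1) with hc | hc
    · exact absurd (by simp [hc]) hx2
    · exact hc

-- The grouped list is pairwise-ordered by pvIdxKey.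
theorem pvFlat_pairwise (l : List String) :
    (CANONICAL_KEY_ORDER.flatMap (fun c => List.replicate (l.count c) c)).Pairwise
      (fun a b => pvIdxKey a ≤ pvIdxKey b) := by
  rw [List.pairwise_flatMap]
  refine ⟨fun c _ => List.pairwise_replicate.mpr (Or.inr le_rfl), ?_⟩
  refine pvCanon_pairwise.imp ?_
  intro c₁ c₂ hlt x hx y hy
  rw [List.eq_of_mem_replicate hx, List.eq_of_mem_replicate hy]
  exact le_of_lt hlt

-- A's stable sort of the known keys IS B's canonical-table sweep.
theorem pvKnown_eq (l : List String) (hl : ∀ x ∈ l, x ∈ CANONICAL_KEY_ORDER) :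
    PySem.List.sorted l pvIdxKey false
      = CANONICAL_KEY_ORDER.flatMap (fun c => List.replicate (l.count c) c) := by
  refine List.Perm.eq_of_pairwise ?_ (PySem.List.sorted_pairwise l pvIdxKey) (pvFlat_pairwise l) ?_
  · intro a b ha hb h1 h2
    have ha' : a ∈ CANONICAL_KEY_ORDER := hl a ((PySem.List.mem_sorted _ _ _ _).mp ha)
    have hb' : b ∈ CANONICAL_KEY_ORDER := by
      rcases List.mem_flatMap.mp hb with ⟨c, hc, hbc⟩
      exact (List.eq_of_mem_replicate hbc) ▸ hc
    exact pvIdxKey_inj ha' hb' (le_antisymm h1 h2)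
  · exact (PySem.List.sorted_perm l pvIdxKey false).trans
      (pvFlat_perm CANONICAL_KEY_ORDER pvCanon_nodup l hl).symm

-- ===== VERDICT (by name: the statement is the Claim_ definition above) =====
theorem get_canonical_key_order_spec : Claim_equal_get_canonical_key_order := by
  intro keys _
  show get_canonical_key_order keys = get_canonical_key_order_alt keys
  simp only [get_canonical_key_order, get_canonical_key_order_alt,
    pvFoldA keys [] [], pvFoldB keys PySem.Dict.empty [], List.nil_append,
    PySem.Dict.foldl_insert_getD_add_one_eq_counter]
  have hg : ∀ c ∈ CANONICAL_KEY_ORDER,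
      List.replicate (((PySem.Dict.counter (keys.filter (fun k => CANONICAL_KEY_ORDER.contains k))).getD c 0).toNat) c
        = List.replicate ((keys.filter (fun k => CANONICAL_KEY_ORDER.contains k)).count c) c := by
    intro c _
    rw [PySem.Dict.getD_counter]
    simp
  rw [PySem.List.foldl_append_eq_flatMap, List.nil_append, List.flatMap_congr hg,
    pvKnown_eq (keys.filter (fun k => CANONICAL_KEY_ORDER.contains k))
      (fun x hx => List.contains_iff_mem.mp (List.of_mem_filter hx))]
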